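-- pv_equiv track=rewrite | github.com/danielrosehill/AI-Textpad | code/ai_textpad/transforms/loader.py | categorize_transformations
-- ===== SOURCE A (Python) =====
-- from typing import List, Dict, Tuple
--
-- def categorize_transformations(transformations: List[Tuple[str, str, str]]) -> Dict[str, List[Tuple[str, str]]]:
--     """Organize transformations by category.
--
--     Args:
--         transformations: List of (name, category, prompt) tuples
--
--     Returns:
--         Dictionary mapping category -> list of (name, prompt) tuples
--     """
--     categorized = {}
--
--     for name, category, prompt in transformations:
--         if category not in categorized:
--             categorized[category] = []
--         categorized[category].append((name, prompt))
--
--     # Sort within each category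
--     for category in categorized:
--         categorized[category].sort(key=lambda x: x[0])
--
--     return categorized
-- ===== SOURCE B (Python) =====
-- def categorize_transformations(transformations):
--     """Organize transformations by category.
--
--     Dict-free group-by: record categories in first-appearance order, then
--     build each category's sorted list directly by a filter comprehension.
--     """
--     categories = []
--     for _, category, _ in transformations:
--         if category not in categories:
--             categories.append(category)
--     return {
--         c: sorted(((n, p) for n, cat, p in transformations if cat == c),
--                   key=lambda x: x[0])
--         for c in categories
--     }
-- ===== Notes on version B (the rewrite author's own statement) =====
-- stated objective: simpler
-- what changed: Replaces A's incremental dict-of-lists build with per-group in-place sorts by a dict-free group-by: collect distinct categories in first-appearance order, then for each category filter the input once and sort that slice.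
import Mathlib
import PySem

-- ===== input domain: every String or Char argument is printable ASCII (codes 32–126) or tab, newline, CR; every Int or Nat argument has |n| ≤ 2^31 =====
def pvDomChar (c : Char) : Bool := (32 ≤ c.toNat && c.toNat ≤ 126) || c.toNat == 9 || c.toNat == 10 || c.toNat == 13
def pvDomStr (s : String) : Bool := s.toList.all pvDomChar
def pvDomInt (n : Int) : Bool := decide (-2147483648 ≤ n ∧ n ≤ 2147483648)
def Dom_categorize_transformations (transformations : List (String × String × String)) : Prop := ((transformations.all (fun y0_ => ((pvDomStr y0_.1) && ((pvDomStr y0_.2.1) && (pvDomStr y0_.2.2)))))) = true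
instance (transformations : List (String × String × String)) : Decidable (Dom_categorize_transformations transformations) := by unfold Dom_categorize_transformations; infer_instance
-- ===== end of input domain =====

-- B replaces A's incremental dict-of-lists build and per-group in-place sorts by a
-- dict-free group-by (distinct categories, then a filtered sort per category): simpler.

-- ===== PORT A =====
def categorize_transformations (transformations : List (String × String × String)) : List (String × List (String × String)) :=
  -- categorized = {}; for name, category, prompt in transformations: …
  let categorized : PySem.Dict String (List (String × String)) :=
    transformations.foldl
      (fun d t =>
        let d := if d.contains t.2.1 then d else d.insert t.2.1 []
        d.modify t.2.1 [] (fun l => l ++ [(t.1, t.2.2)]))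
      PySem.Dict.empty
  -- for category in categorized: categorized[category].sort(key=lambda x: x[0])
  let categorized :=
    categorized.keys.foldl
      (fun d c => d.modify c [] (fun l => PySem.List.sorted l (fun x => x.1)))
      categorized
  categorized.items

-- ===== PORT B =====
def categorize_transformations_alt (transformations : List (String × String × String)) : List (String × List (String × String)) :=
  -- categories = []; for _, category, _ in …: if category not in categories: categories.append(category)
  let categories := PySem.Set.ofList (transformations.map (fun t => t.2.1))
  -- {c: sorted(((n, p) for n, cat, p in transformations if cat == c), key=…) for c in categories}
  categories.map (fun c =>
    (c, PySem.List.sorted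
          ((transformations.filter (fun t => t.2.1 == c)).map (fun t => (t.1, t.2.2)))
          (fun x => x.1)))

-- ===== PRECONDITION & SPEC =====
def Spec_categorize_transformations (transformations : List (String × String × String)) (out : List (String × List (String × String))) : Prop := out = categorize_transformations_alt transformations
instance (transformations : List (String × String × String)) (out : List (String × List (String × String))) : Decidable (Spec_categorize_transformations transformations out) := by unfold Spec_categorize_transformations; infer_instance

-- ===== CLAIM (what is proved, stated in full; the proofs are below) =====
def Claim_equal_categorize_transformations : Prop := ∀ (transformations : List (String × String × String)), Dom_categorize_transformations transformations → Spec_categorize_transformations transformations (categorize_transformations transformations)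

-- ===== LEMMAS AND PROOFS =====

-- per-item contribution to category c (B computes exactly this, sorted)
def pvCollect (c : String) (l : List (String × String × String)) : List (String × String) :=
  (l.filter (fun t => t.2.1 == c)).map (fun t => (t.1, t.2.2))

-- A's guarded "insert [] then append" is just modify with default []
theorem pvStepA_eq (d : PySem.Dict String (List (String × String))) (c : String)
    (f : List (String × String) → List (String × String)) :
    ((if d.contains c then d else d.insert c []).modify c [] f) = d.modify c [] f := by
  by_cases h : d.contains c = true
  · simp [h]
  · have h' : d.contains c = false := by simpa using h
    have hg : d.getD c [] = [] := PySem.Dict.getD_of_not_contains d [] h'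
    simp [h', PySem.Dict.modify, PySem.Dict.getD_insert_self,
      PySem.Dict.insert_insert_self, hg]

theorem pvSet_update_self (s : List String) (xs : List String) (h : ∀ x ∈ xs, x ∈ s) :
    PySem.Set.update s xs = s := by
  induction xs generalizing s with
  | nil => rfl
  | cons x xs ih =>
      have hmem : x ∈ s := h x (by simp)
      have hadd : PySem.Set.add s x = s := by simp [PySem.Set.add, hmem]
      show PySem.Set.update (PySem.Set.add s x) xs = s
      rw [hadd]; exact ih s (fun y hy => h y (by simp [hy]))

theorem pvSortLoop_getD (ks : List String) (d : PySem.Dict String (List (String × String))) (c : String) :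
    ((ks.foldl (fun d c => d.modify c [] (fun l => PySem.List.sorted l (fun x => x.1))) d)).getD c []
      = if c ∈ ks then PySem.List.sorted (d.getD c []) (fun x => x.1) else d.getD c [] := by
  induction ks generalizing d with
  | nil => simp
  | cons k ks ih =>
      simp only [List.foldl_cons, ih, PySem.Dict.getD_modify, List.mem_cons]
      by_cases hc : c ∈ ks
      · by_cases he : c = k <;> simp [hc, he, PySem.List.sorted_sorted]
      · by_cases he : c = k <;> simp [hc, he]

-- A's grouping loop, rewritten as a pure modify loop over (category, payload) pairs
theorem pvGroupA_eq (ts : List (String × String × String)) :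
    ts.foldl
        (fun d t =>
          let d := if d.contains t.2.1 then d else d.insert t.2.1 []
          d.modify t.2.1 [] (fun l => l ++ [(t.1, t.2.2)]))
        PySem.Dict.empty
      = (ts.map (fun t => (t.2.1, (t.1, t.2.2)))).foldl
          (fun d p => d.modify p.1 [] (fun l => l ++ [p.2])) PySem.Dict.empty := by
  rw [List.foldl_map]
  have hfg : (fun (d : PySem.Dict String (List (String × String))) (t : String × String × String) =>
        let d := if d.contains t.2.1 then d else d.insert t.2.1 []
        d.modify t.2.1 [] (fun l => l ++ [(t.1, t.2.2)]))
      = fun d t => d.modify t.2.1 [] (fun l => l ++ [(t.1, t.2.2)]) := by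
    funext d t
    exact pvStepA_eq d t.2.1 _
  rw [hfg]

-- characterization of A's output: exactly B's comprehension
theorem pvA_char (ts : List (String × String × String)) :
    categorize_transformations ts
      = (PySem.Set.ofList (ts.map (fun t => t.2.1))).map
          (fun c => (c, PySem.List.sorted (pvCollect c ts) (fun x => x.1))) := by
  simp only [categorize_transformations]
  rw [pvGroupA_eq]
  have hkeys : ((ts.map (fun t => (t.2.1, (t.1, t.2.2)))).foldl
        (fun d p => d.modify p.1 [] (fun l => l ++ [p.2])) PySem.Dict.empty).keys
      = PySem.Set.ofList (ts.map (fun t => t.2.1)) := by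
    rw [PySem.Dict.keys_foldl_modify_key (ts.map (fun t => (t.2.1, (t.1, t.2.2)))) Prod.fst []
      (fun _ p => fun l => l ++ [p.2]) PySem.Dict.empty]
    simp [PySem.Dict.keys_empty, PySem.Set.update_nil_left, List.map_map, Function.comp_def]
  have hnodup : ((ts.map (fun t => (t.2.1, (t.1, t.2.2)))).foldl
        (fun d p => d.modify p.1 [] (fun l => l ++ [p.2])) PySem.Dict.empty).keys.Nodup := by
    rw [hkeys]; exact PySem.Set.nodup_ofList _
  have hgetD : ∀ c, ((ts.map (fun t => (t.2.1, (t.1, t.2.2)))).foldl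
        (fun d p => d.modify p.1 [] (fun l => l ++ [p.2])) PySem.Dict.empty).getD c []
      = pvCollect c ts := by
    intro c
    rw [PySem.Dict.getD_foldl_modify_append]
    simp [pvCollect, List.filter_map, List.map_map, Function.comp_def]
  have hnodup2 : ((((ts.map (fun t => (t.2.1, (t.1, t.2.2)))).foldl
        (fun d p => d.modify p.1 [] (fun l => l ++ [p.2])) PySem.Dict.empty).keys).foldl
        (fun d c => d.modify c [] (fun l => PySem.List.sorted l (fun x => x.1)))
        ((ts.map (fun t => (t.2.1, (t.1, t.2.2)))).foldl
          (fun d p => d.modify p.1 [] (fun l => l ++ [p.2])) PySem.Dict.empty)).keys.Nodup := by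
    exact PySem.Dict.nodup_keys_foldl_modify_key _ (fun c => c) [] (fun _ c => fun l => PySem.List.sorted l (fun x => x.1)) _ hnodup
  rw [PySem.Dict.items_eq_map_keys _ hnodup2 []]
  have hkeys2 : ((((ts.map (fun t => (t.2.1, (t.1, t.2.2)))).foldl
        (fun d p => d.modify p.1 [] (fun l => l ++ [p.2])) PySem.Dict.empty).keys).foldl
        (fun d c => d.modify c [] (fun l => PySem.List.sorted l (fun x => x.1)))
        ((ts.map (fun t => (t.2.1, (t.1, t.2.2)))).foldl
          (fun d p => d.modify p.1 [] (fun l => l ++ [p.2])) PySem.Dict.empty)).keys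
      = PySem.Set.ofList (ts.map (fun t => t.2.1)) := by
    rw [PySem.Dict.keys_foldl_modify _ [] (fun (_ : PySem.Dict String (List (String × String))) (_ : String) => fun (l : List (String × String)) => PySem.List.sorted l (fun x => x.1)) _]
    rw [pvSet_update_self _ _ (fun x hx => hx)]
    exact hkeys
  rw [hkeys2]
  apply List.map_congr_left
  intro c hc
  have hcmem : c ∈ ((ts.map (fun t => (t.2.1, (t.1, t.2.2)))).foldl
        (fun d p => d.modify p.1 [] (fun l => l ++ [p.2])) PySem.Dict.empty).keys := by
    rw [hkeys]; exact hc
  rw [pvSortLoop_getD, if_pos hcmem, hgetD c]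

-- ===== VERDICT (by name: the statement is the Claim_ definition above) =====
theorem categorize_transformations_spec : Claim_equal_categorize_transformations := by
  intro ts _
  show categorize_transformations ts = categorize_transformations_alt ts
  rw [pvA_char]
  rfl
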